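-- pv_equiv track=rewrite | github.com/hyungmogu/algorithm-exercises | Programmers/2_전화번호 목록/main.py | solution
-- ===== SOURCE A (Python) =====
-- def solution(phone_book):
--     N = len(phone_book)
--     i = 0
--     while i < N:
--         j = i +1
--         while j < N:
--             smaller_number = min(phone_book[i], phone_book[j])
--             larger_number = max(phone_book[i], phone_book[j])
--             if smaller_number in larger_number:
--                 return False
--
--             j += 1
--         i += 1
--
--     answer = True
--     return answer
-- ===== SOURCE B (Python) =====
-- def solution(phone_book):
--     seen = []
--     for t in sorted(phone_book):
--         for s in seen:
--             if s in t:
--                 return False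
--         seen.append(t)
--     return True
-- ===== Notes on version B (the rewrite author's own statement) =====
-- stated objective: simpler
-- what changed: B sorts the list first so each string is compared only against the already-seen (lexicographically smaller-or-equal) strings, removing A's per-pair min/max computation and index arithmetic.
import Mathlib
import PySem

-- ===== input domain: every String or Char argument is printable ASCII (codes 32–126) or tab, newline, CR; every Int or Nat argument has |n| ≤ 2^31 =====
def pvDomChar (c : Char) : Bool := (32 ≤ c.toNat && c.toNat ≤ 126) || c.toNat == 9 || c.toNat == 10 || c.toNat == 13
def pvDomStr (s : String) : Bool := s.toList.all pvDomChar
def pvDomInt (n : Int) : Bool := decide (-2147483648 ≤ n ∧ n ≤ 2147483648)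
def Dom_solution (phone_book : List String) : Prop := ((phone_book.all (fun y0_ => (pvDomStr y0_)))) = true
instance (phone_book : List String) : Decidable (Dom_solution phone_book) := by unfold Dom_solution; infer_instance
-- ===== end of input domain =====

-- B sorts the list first and checks each string only against the already-seen smaller-or-equal ones (no per-pair min/max); objective: simpler.


-- ===== PORT A =====
-- inner while loop: returns true iff some j ≥ start triggers the substring test (A returns False)
def solA_inner (pb : List String) (xi : String) (j : Nat) : Bool :=
  if h : j < pb.length then
    let xj := pb[j]
    let smaller := if xi ≤ xj then xi else xj   -- min(phone_book[i], phone_book[j])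
    let larger  := if xj ≤ xi then xi else xj   -- max(phone_book[i], phone_book[j])
    if PySem.Str.isIn smaller larger then true
    else solA_inner pb xi (j + 1)
  else false
termination_by pb.length - j

def solA_outer (pb : List String) (i : Nat) : Bool :=
  if h : i < pb.length then
    if solA_inner pb pb[i] (i + 1) then false
    else solA_outer pb (i + 1)
  else true
termination_by pb.length - i

def solution (phone_book : List String) : Bool := solA_outer phone_book 0

-- ===== PORT B =====
-- 'for t in sorted(...): for s in seen: if s in t: return False; seen.append(t)'
def solB_loop (seen : List String) (rest : List String) : Bool :=
  match rest with
  | [] => true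
  | t :: rest' =>
    if seen.any (fun s => PySem.Str.isIn s t) then false
    else solB_loop (seen ++ [t]) rest'

def solution_alt (phone_book : List String) : Bool :=
  solB_loop [] (PySem.List.sorted phone_book (fun x => x) false)

-- ===== PRECONDITION & SPEC =====
def Spec_solution (phone_book : List String) (out : Bool) : Prop := out = solution_alt phone_book
instance (phone_book : List String) (out : Bool) : Decidable (Spec_solution phone_book out) := by unfold Spec_solution; infer_instance

-- ===== CLAIM (what is proved, stated in full; the proofs are below) =====
def Claim_equal_solution : Prop := ∀ (phone_book : List String), Dom_solution phone_book → Spec_solution phone_book (solution phone_book)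

-- ===== LEMMAS AND PROOFS =====

-- the symmetric pair test A applies: min is a substring of max
def pvQ (x y : String) : Bool :=
  PySem.Str.isIn (if x ≤ y then x else y) (if y ≤ x then x else y)

theorem pvQ_symm (x y : String) : pvQ x y = pvQ y x := by
  unfold pvQ
  by_cases hxy : x ≤ y <;> by_cases hyx : y ≤ x
  · have hxyeq : x = y := le_antisymm hxy hyx
    subst hxyeq; rfl
  · rw [if_pos hxy, if_neg hyx, if_neg hyx, if_pos hxy]
  · rw [if_neg hxy, if_pos hyx, if_pos hyx, if_neg hxy]
  · exact absurd (le_total x y) (by simp [hxy, hyx])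

theorem pvQ_of_le {x y : String} (h : x ≤ y) : pvQ x y = PySem.Str.isIn x y := by
  unfold pvQ
  by_cases h' : y ≤ x
  · have hxyeq : x = y := le_antisymm h h'
    subst hxyeq; simp
  · rw [if_pos h, if_neg h']

theorem solA_inner_spec (pb : List String) (xi : String) (j : Nat) :
    solA_inner pb xi j = (pb.drop j).any (fun y => pvQ xi y) := by
  induction hfuel : pb.length - j using Nat.strong_induction_on generalizing j with
  | _ n ih =>
    rw [solA_inner]
    by_cases h : j < pb.length
    · rw [List.drop_eq_getElem_cons h]
      simp only [h, dif_pos, List.any_cons]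
      rw [ih (pb.length - (j + 1)) (by omega) (j + 1) rfl]
      have hpv : pvQ xi pb[j] =
          PySem.Str.isIn (if xi ≤ pb[j] then xi else pb[j]) (if pb[j] ≤ xi then xi else pb[j]) := rfl
      rw [← hpv]
      by_cases hq : pvQ xi pb[j] = true
      · rw [if_pos hq, hq, Bool.true_or]
      · rw [if_neg hq]
        simp only [Bool.not_eq_true] at hq
        rw [hq, Bool.false_or]
    · simp [h, List.drop_eq_nil_of_le (by omega : pb.length ≤ j)]

theorem solA_outer_spec (pb : List String) (i : Nat) :
    solA_outer pb i = true ↔ (pb.drop i).Pairwise (fun x y => pvQ x y = false) := by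
  induction hfuel : pb.length - i using Nat.strong_induction_on generalizing i with
  | _ n ih =>
    rw [solA_outer]
    by_cases h : i < pb.length
    · rw [List.drop_eq_getElem_cons h]
      simp only [h, dif_pos, List.pairwise_cons]
      rw [solA_inner_spec]
      split_ifs with ha
      · constructor
        · intro hc; cases hc
        · rintro ⟨hall, -⟩
          simp only [List.any_eq_true] at ha
          obtain ⟨y, hy, hq⟩ := ha
          simp [hall y hy] at hq
      · rw [ih (pb.length - (i + 1)) (by omega) (i + 1) rfl]
        simp only [List.any_eq_true, not_exists, not_and, Bool.not_eq_true] at ha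
        constructor
        · intro hp
          exact ⟨fun y hy => ha y hy, hp⟩
        · rintro ⟨-, hp⟩; exact hp
    · simp [h, List.drop_eq_nil_of_le (by omega : pb.length ≤ i)]

theorem solB_loop_spec (rest seen : List String) :
    solB_loop seen rest = true ↔
      ((∀ t ∈ rest, ∀ s ∈ seen, PySem.Str.isIn s t = false) ∧
        rest.Pairwise (fun s t => PySem.Str.isIn s t = false)) := by
  induction rest generalizing seen with
  | nil => simp [solB_loop]
  | cons t rest' ih =>
    rw [solB_loop]
    split_ifs with ha
    · constructor
      · intro hc; cases hc
      · rintro ⟨hcross, -⟩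
        simp only [List.any_eq_true] at ha
        obtain ⟨s, hs, hq⟩ := ha
        have hc := hcross t (List.mem_cons_self) s hs
        rw [hq] at hc
        cases hc
    · rw [ih]
      simp only [List.any_eq_true, not_exists, not_and, Bool.not_eq_true] at ha
      constructor
      · rintro ⟨hcross, hp⟩
        refine ⟨?_, ?_⟩
        · intro u hu s hs
          rcases List.mem_cons.mp hu with hu' | hu'
          · exact hu' ▸ ha s hs
          · exact hcross u hu' s (by simp [hs])
        · refine List.pairwise_cons.mpr ⟨fun u hu => ?_, hp⟩
          exact hcross u hu t (by simp)
      · rintro ⟨hcross, hp⟩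
        rw [List.pairwise_cons] at hp
        refine ⟨?_, hp.2⟩
        intro u hu s hs
        simp only [List.mem_append, List.mem_singleton] at hs
        rcases hs with hs | hs
        · exact hcross u (by simp [hu]) s hs
        · exact hs ▸ hp.1 u hu

theorem solution_alt_spec (pb : List String) :
    solution_alt pb = true ↔
      (PySem.List.sorted pb (fun x => x) false).Pairwise (fun x y => pvQ x y = false) := by
  unfold solution_alt
  rw [solB_loop_spec]
  have hsorted : (PySem.List.sorted pb (fun x => x) false).Pairwise (fun a b => a ≤ b) :=
    PySem.List.sorted_pairwise pb (fun x => x)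
  constructor
  · rintro ⟨-, hp⟩
    have := hp.and hsorted
    exact this.imp (fun {a b} h => by rw [pvQ_of_le h.2]; exact h.1)
  · intro hp
    refine ⟨by simp, ?_⟩
    have := hp.and hsorted
    exact this.imp (fun {a b} h => by rw [← pvQ_of_le h.2]; exact h.1)

theorem pairwise_perm_iff (pb : List String) :
    pb.Pairwise (fun x y => pvQ x y = false) ↔
      (PySem.List.sorted pb (fun x => x) false).Pairwise (fun x y => pvQ x y = false) := by
  have hperm : (PySem.List.sorted pb (fun x => x) false).Perm pb :=
    PySem.List.sorted_perm pb (fun x => x) false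
  exact ((hperm.pairwise_iff (fun {a b} h => by rw [pvQ_symm]; exact h))).symm

-- ===== VERDICT (by name: the statement is the Claim_ definition above) =====
theorem solution_spec : Claim_equal_solution := by
  intro pb _
  unfold Spec_solution
  rw [Bool.eq_iff_iff]
  unfold solution
  rw [solA_outer_spec, solution_alt_spec, List.drop_zero]
  exact pairwise_perm_iff pb
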